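-- pv_equiv track=rewrite | github.com/pilino1234/AdventOfCode2017 | Day6/Day6.py | redist_in_banks
-- ===== SOURCE A (Python) =====
-- def find_largest_bank(banks):
--     largest_idx = 0
--
--     for idx, val in enumerate(banks):
--         if val > banks[largest_idx]:
--             largest_idx = idx
--
--     return largest_idx
--
-- def redist_in_banks(banks):
--     blen = len(banks)
--
--     idx = find_largest_bank(banks)
--
--     val_to_redist = banks[idx]
--     banks[idx] = 0
--
--     while val_to_redist > 0:
--         banks[(idx + 1) % blen] += 1
--         val_to_redist -= 1
--         idx += 1
--
--     return banks
-- ===== SOURCE B (Python) =====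
-- def redist_in_banks(banks):
--     blen = len(banks)
--     val = max(banks)
--     idx = banks.index(val)
--     banks[idx] = 0
--     if val > 0:
--         q, r = divmod(val, blen)
--         banks[:] = [b + q for b in banks]
--         for k in range(1, r + 1):
--             banks[(idx + k) % blen] += 1
--     return banks
-- ===== Notes on version B (the rewrite author's own statement) =====
-- stated objective: faster
-- what changed: A moves the largest bank's tokens one at a time around the ring (O(blen + val) iterations); B computes q, r = divmod(val, blen) and adds q to every bank plus 1 to the r banks following the chosen index (O(blen)).
import Mathlib
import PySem

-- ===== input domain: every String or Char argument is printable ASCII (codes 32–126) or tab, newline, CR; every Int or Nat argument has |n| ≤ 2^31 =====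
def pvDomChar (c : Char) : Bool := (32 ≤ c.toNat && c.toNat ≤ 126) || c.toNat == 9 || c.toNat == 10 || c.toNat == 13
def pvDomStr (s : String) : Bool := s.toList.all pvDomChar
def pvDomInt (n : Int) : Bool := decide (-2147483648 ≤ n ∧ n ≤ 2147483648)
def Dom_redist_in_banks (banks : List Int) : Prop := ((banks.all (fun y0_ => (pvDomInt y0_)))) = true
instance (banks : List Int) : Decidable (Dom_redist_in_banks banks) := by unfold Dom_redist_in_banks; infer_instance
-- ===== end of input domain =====

-- B replaces A's one-token-at-a-time O(blen+val) loop by divmod arithmetic, O(blen); return values proved equal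
-- (both A and B mutate the Python list in place the same way; the proof is about the returned list).

-- shared one-statement helper: Python's 'banks[i] += 1' (both sources contain this exact statement)
def pyBumpAt (bs : List Int) (i : Int) : List Int :=
  PySem.List.pySetD bs i (PySem.List.pyGetD bs i 0 + 1)

-- ===== PORT A =====
-- 'largest_idx' is always a valid index while the loop runs, so Python never raises in the body;
-- pyGetD is exact here.
def find_largest_bank (banks : List Int) : Int :=
  (PySem.List.enumerate banks).foldl
    (fun li p => if p.2 > PySem.List.pyGetD banks li 0 then p.1 else li) 0

-- the 'while val_to_redist > 0' loop of A: it decrements val_to_redist by exactly 1 per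
-- iteration, so it runs exactly max(val,0) = val.toNat times; we recurse on that count.
def redistLoopAGo : Nat → List Int → Int → Int → List Int
  | 0, bs, _, _ => bs
  | n + 1, bs, idx, blen =>
      redistLoopAGo n (pyBumpAt bs (PySem.Int.mod (idx + 1) blen)) (idx + 1) blen

def redistLoopA (bs : List Int) (val idx blen : Int) : List Int :=
  redistLoopAGo val.toNat bs idx blen

def redist_in_banks (banks : List Int) : List Int :=
  let blen : Int := banks.length
  let idx := find_largest_bank banks
  match PySem.List.pyGet? banks idx with
  | none => []   -- Python raises IndexError here (only for banks = []); excluded by Pre_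
  | some v => redistLoopA (PySem.List.pySetD banks idx 0) v idx blen

-- ===== PORT B =====
def redist_in_banks_alt (banks : List Int) : List Int :=
  let blen : Int := banks.length
  match PySem.List.max? banks (fun x => x) with
  | none => []   -- Python max([]) raises ValueError; excluded by Pre_
  | some val =>
    match PySem.List.index? banks val with
    | none => []   -- unreachable: the max is a member
    | some idx =>
      let banks1 := banks.set idx 0   -- idx comes from .index, always in range
      if 0 < val then
        let q := PySem.Int.floordiv val blen
        let r := PySem.Int.mod val blen
        let banks2 := banks1.map (fun b => b + q)      -- banks[:] = [b + q for b in banks]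
        (PySem.List.pyRange 1 (r + 1) 1).foldl
          (fun bs k => pyBumpAt bs (PySem.Int.mod ((idx : Int) + k) blen)) banks2
      else banks1

-- ===== PRECONDITION & SPEC =====
-- Pre_ excludes only the empty list, on which A raises IndexError (and B raises ValueError).
def Pre_redist_in_banks (banks : List Int) : Prop := banks ≠ []
instance (banks : List Int) : Decidable (Pre_redist_in_banks banks) := by
  unfold Pre_redist_in_banks; infer_instance

def pvWitness_redist_in_banks : List Int := [0, 2, 7, 0]

def Spec_redist_in_banks (banks : List Int) (out : List Int) : Prop := out = redist_in_banks_alt banks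
instance (banks : List Int) (out : List Int) : Decidable (Spec_redist_in_banks banks out) := by
  unfold Spec_redist_in_banks; infer_instance

-- ===== CLAIM (what is proved, stated in full; the proofs are below) =====
def Claim_equal_redist_in_banks : Prop := ∀ (banks : List Int), Dom_redist_in_banks banks → Pre_redist_in_banks banks → Spec_redist_in_banks banks (redist_in_banks banks)

-- ===== LEMMAS AND PROOFS =====

-- reference version of A's find_largest_bank fold: s = index of the head of the remaining
-- suffix, li = current best index, best = value at li
def flbRef : List Int → Nat → Nat → Int → Nat
  | [], _, li, _ => li
  | y :: t, s, li, best => if best < y then flbRef t (s+1) s y else flbRef t (s+1) li best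

-- number of t < v with (c + t) ≡ j (mod N): how many tokens of a round-robin run land on cell j
def hits (c N j : Int) (v : Nat) : Nat :=
  (List.range v).countP (fun t : Nat => decide ((c + (t : Int)) % N = j))

lemma flb_fold_eq_ref (banks : List Int) :
    ∀ (ys : List Int) (s li : Nat), banks.drop s = ys →
    (PySem.List.enumerate ys (s:Int)).foldl
        (fun li p => if p.2 > PySem.List.pyGetD banks li 0 then p.1 else li) ((li:Nat):Int)
      = ((flbRef ys s li (banks.getD li 0) : Nat) : Int) := by
  intro ys
  induction ys with
  | nil => intro s li h; simp [PySem.List.enumerate, flbRef]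
  | cons y t ih =>
    intro s li h
    have h0 : banks[s]? = some y := by
      have h' := List.getElem?_drop (xs := banks) (i := s) (j := 0)
      rw [h] at h'; simpa using h'.symm
    have hy : banks.getD s 0 = y := by simp [List.getD_eq_getElem?_getD, h0]
    have ht : banks.drop (s+1) = t := by
      have h' := List.drop_drop (i := 1) (j := s) (l := banks)
      rw [h] at h'; simpa using h'.symm
    rw [PySem.List.enumerate_cons]
    simp only [List.foldl_cons, gt_iff_lt, PySem.List.pyGetD_natCast]
    have hcast : (s : Int) + 1 = ((s + 1 : Nat) : Int) := by push_cast; ring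
    by_cases hc : banks.getD li 0 < y
    · rw [if_pos hc, hcast, ih (s+1) s ht, hy,
        show flbRef (y :: t) s li (banks.getD li 0) = flbRef t (s+1) s y by
          simp only [flbRef]; rw [if_pos hc]]
    · rw [if_neg hc, hcast, ih (s+1) li ht,
        show flbRef (y :: t) s li (banks.getD li 0) = flbRef t (s+1) li (banks.getD li 0) by
          simp only [flbRef]; rw [if_neg hc]]

lemma flbRef_of_le : ∀ (t : List Int) (s li : Nat) (best : Int),
    List.foldl max best t ≤ best → flbRef t s li best = li := by
  intro t
  induction t with
  | nil => intro s li best _; rfl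
  | cons y t ih =>
    intro s li best h
    simp only [List.foldl_cons] at h
    have h1 := (PySem.List.le_foldl_max t (max best y)).1
    obtain ⟨-, hyb⟩ := max_le_iff.mp (le_trans h1 h)
    have hb : max best y = best := max_eq_left hyb
    rw [hb] at h
    simp only [flbRef, if_neg (not_lt.mpr hyb)]
    exact ih _ _ _ h

lemma flbRef_of_lt : ∀ (t : List Int) (s li : Nat) (best : Int),
    best < List.foldl max best t →
    flbRef t s li best = s + List.idxOf (List.foldl max best t) t := by
  intro t
  induction t with
  | nil => intro s li best h; simp at h
  | cons y t ih =>
    intro s li best h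
    simp only [List.foldl_cons] at h ⊢
    by_cases hy : best < y
    · have hmax : max best y = y := max_eq_right hy.le
      rw [hmax] at h ⊢
      simp only [flbRef, if_pos hy]
      by_cases hM : y < List.foldl max y t
      · rw [ih _ _ _ hM, List.idxOf_cons_ne t (ne_of_lt hM)]
        omega
      · have hEq : List.foldl max y t = y :=
          le_antisymm (not_lt.mp hM) (PySem.List.le_foldl_max t y).1
        rw [flbRef_of_le t (s+1) s y (le_of_eq hEq), hEq, List.idxOf_cons_self]
        omega
    · have hmax : max best y = best := max_eq_left (not_lt.mp hy)
      rw [hmax] at h ⊢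
      simp only [flbRef, if_neg hy]
      rw [ih _ _ _ h, List.idxOf_cons_ne t (ne_of_lt (lt_of_le_of_lt (not_lt.mp hy) h))]
      omega

lemma flb_eq_idxOf (b : Int) (rest : List Int) :
    find_largest_bank (b :: rest)
      = ((List.idxOf (List.foldl max b rest) (b :: rest) : Nat) : Int) := by
  have h := flb_fold_eq_ref (b :: rest) (b :: rest) 0 0 (by simp)
  simp only [Nat.cast_zero, List.getD_cons_zero] at h
  unfold find_largest_bank
  rw [h]
  have hstep : flbRef (b :: rest) 0 0 b = flbRef rest 1 0 b := by
    simp [flbRef]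
  rw [hstep]
  by_cases hb : b < List.foldl max b rest
  · rw [flbRef_of_lt rest 1 0 b hb, List.idxOf_cons_ne rest (ne_of_lt hb)]
    push_cast
    omega
  · have hEq : List.foldl max b rest = b :=
      le_antisymm (not_lt.mp hb) (PySem.List.le_foldl_max rest b).1
    rw [flbRef_of_le rest 1 0 b (le_of_eq hEq), hEq, List.idxOf_cons_self]

lemma hits_zero (c N j : Int) : hits c N j 0 = 0 := by simp [hits]

lemma hits_front (c N j : Int) (v : Nat) :
    hits c N j (v+1) = hits (c+1) N j v + (if c % N = j then 1 else 0) := by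
  simp only [hits, List.range_succ_eq_map, List.countP_cons, List.countP_map]
  have hfun : ((fun t : Nat => decide ((c + (t : Int)) % N = j)) ∘ Nat.succ)
      = fun t : Nat => decide (((c+1) + (t : Int)) % N = j) := by
    funext t
    simp only [Function.comp]
    exact congrArg (fun z => decide (z % N = j)) (by push_cast; ring)
  rw [hfun]
  simp [decide_eq_true_eq]

lemma hits_back (c N j : Int) (v : Nat) :
    hits c N j (v+1) = hits c N j v + (if (c + v) % N = j then 1 else 0) := by
  simp only [hits, List.range_succ, List.countP_append, List.countP_cons, List.countP_nil]
  simp [decide_eq_true_eq]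

lemma hits_add (c N j : Int) (a b : Nat) :
    hits c N j (a + b) = hits c N j a + hits (c + a) N j b := by
  simp only [hits, List.range_add, List.countP_append, List.countP_map]
  congr 1
  have hfun : ((fun t : Nat => decide ((c + (t : Int)) % N = j)) ∘ fun x => a + x)
      = fun t : Nat => decide (((c + (a : Int)) + (t : Int)) % N = j) := by
    funext t
    simp only [Function.comp]
    exact congrArg (fun z => decide (z % N = j)) (by push_cast; ring)
  rw [hfun]

lemma hits_small (n : Nat) (hn : 0 < n) (c j : Int) (h0 : 0 ≤ j) (h1 : j < (n:Int)) :
    ∀ (m : Nat), m ≤ n →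
    hits c n j m = if (j - c) % (n:Int) < (m:Int) then 1 else 0 := by
  intro m
  induction m with
  | zero =>
    intro _
    have : ¬ ((j - c) % (n:Int) < ((0:Nat):Int)) := by
      have := Int.emod_nonneg (j - c) (b := (n:Int)) (by exact_mod_cast hn.ne')
      push_cast; omega
    rw [hits_zero, if_neg this]
  | succ m ih =>
    intro hm
    have hNpos : (0:Int) < (n:Int) := by exact_mod_cast hn
    have hmn : (m:Int) < (n:Int) := by exact_mod_cast hm
    have key : ((c + (m:Int)) % (n:Int) = j) ↔ ((j - c) % (n:Int) = (m:Int)) := by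
      constructor
      · intro h'
        calc (j - c) % (n:Int) = ((c + m) % n - c) % (n:Int) := by rw [h']
          _ = ((c + m) - c) % (n:Int) := Int.emod_sub_emod _ _ _
          _ = (m:Int) % (n:Int) := by ring_nf
          _ = (m:Int) := Int.emod_eq_of_lt (by positivity) hmn
      · intro h'
        calc (c + (m:Int)) % (n:Int) = (c + (j - c) % n) % (n:Int) := by rw [h']
          _ = (c + (j - c)) % (n:Int) := Int.add_emod_emod _ _ _
          _ = j % (n:Int) := by ring_nf
          _ = j := Int.emod_eq_of_lt h0 h1
    rw [hits_back, ih (by omega)]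
    have he0 : 0 ≤ (j - c) % (n:Int) := Int.emod_nonneg _ (by exact_mod_cast hn.ne')
    by_cases hd : (c + (m:Int)) % (n:Int) = j
    · have hem := key.mp hd
      rw [if_pos hd, hem]
      push_cast
      split_ifs <;> omega
    · have hne : (j - c) % (n:Int) ≠ (m:Int) := fun he => hd (key.mpr he)
      rw [if_neg hd]
      generalize (j - c) % (n:Int) = e at he0 hne
      push_cast
      split_ifs <;> omega

lemma hits_closed (n : Nat) (hn : 0 < n) (c j : Int) (h0 : 0 ≤ j) (h1 : j < (n:Int)) :
    ∀ (v : Nat), hits c n j v = v / n + (if (j - c) % (n:Int) < ((v % n : Nat):Int) then 1 else 0) := by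
  intro v
  induction v using Nat.strong_induction_on with
  | _ v ih =>
    by_cases hv : v < n
    · rw [hits_small n hn c j h0 h1 v hv.le, Nat.div_eq_of_lt hv, Nat.mod_eq_of_lt hv]
      exact (Nat.zero_add _).symm
    · have hw : v = (v - n) + n := by omega
      rw [hw, hits_add]
      have hfull : hits (c + ((v - n : Nat):Int)) n j n = 1 := by
        rw [hits_small n hn _ j h0 h1 n le_rfl]
        exact if_pos (Int.emod_lt_of_pos _ (by exact_mod_cast hn))
      rw [hfull, ih (v - n) (by omega), Nat.add_div_right _ hn, Nat.add_mod_right]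
      ring

lemma bump_len (bs : List Int) (i : Int) : (pyBumpAt bs i).length = bs.length := by
  simp [pyBumpAt, PySem.List.length_pySetD]

lemma bump_point (bs : List Int) (n : Nat) (hn : 0 < n) (hlen : bs.length = n)
    (i : Int) (j : Nat) (_hj : j < n) :
    PySem.List.pyGetD (pyBumpAt bs (PySem.Int.mod i (n:Int))) ((j:Nat):Int) 0
      = PySem.List.pyGetD bs ((j:Nat):Int) 0 + (if i % (n:Int) = (j:Int) then 1 else 0) := by
  have hpos : (0:Int) < (n:Int) := by exact_mod_cast hn
  rw [pyBumpAt, PySem.Int.mod_eq_emod_of_pos hpos]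
  have hnn : 0 ≤ i % (n:Int) := Int.emod_nonneg _ (ne_of_gt hpos)
  have hlt : i % (n:Int) < (n:Int) := Int.emod_lt_of_pos _ hpos
  obtain ⟨k, hk⟩ : ∃ k : Nat, i % (n:Int) = (k:Int) := ⟨(i % (n:Int)).toNat, (Int.toNat_of_nonneg hnn).symm⟩
  rw [hk]
  have hkn : k < bs.length := by rw [hlen]; exact_mod_cast hk ▸ hlt
  rw [PySem.List.pyGetD_pySetD_natCast bs k j _ _ hkn]
  by_cases hjk : j = k
  · subst hjk
    simp
  · have hne : ((k:Nat):Int) ≠ ((j:Nat):Int) := by exact_mod_cast Ne.symm hjk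
    rw [if_neg hjk, if_neg hne]
    simp

lemma loopA_len (N : Int) : ∀ (v : Nat) (bs : List Int) (idx : Int),
    (redistLoopAGo v bs idx N).length = bs.length := by
  intro v
  induction v with
  | zero => intro bs idx; rfl
  | succ v ih => intro bs idx; rw [redistLoopAGo, ih, bump_len]

lemma loopA_point (n : Nat) (hn : 0 < n) (j : Nat) (hj : j < n) :
    ∀ (v : Nat) (bs : List Int) (idx : Int), bs.length = n →
    PySem.List.pyGetD (redistLoopAGo v bs idx (n:Int)) ((j:Nat):Int) 0
      = PySem.List.pyGetD bs ((j:Nat):Int) 0 + (hits (idx+1) (n:Int) (j:Int) v : Int) := by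
  intro v
  induction v with
  | zero => intro bs idx hlen; simp [redistLoopAGo, hits_zero]
  | succ v ih =>
    intro bs idx hlen
    rw [redistLoopAGo, ih _ (idx+1) (by rw [bump_len]; exact hlen),
      bump_point bs n hn hlen (idx+1) j hj, hits_front]
    push_cast
    ring

lemma loopB_len (n idx : Int) : ∀ (r : Nat) (bs : List Int),
    ((PySem.List.pyRange 1 ((r:Int)+1) 1).foldl
        (fun bs k => pyBumpAt bs (PySem.Int.mod (idx + k) n)) bs).length = bs.length := by
  intro r
  induction r with
  | zero =>
    intro bs
    rw [show (((0:Nat):Int) + 1) = 1 by norm_num, PySem.List.pyRange_one_eq_nil le_rfl]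
    rfl
  | succ r ih =>
    intro bs
    rw [show (((r+1:Nat):Int) + 1) = (((r:Int)+1) + 1) by push_cast; ring,
      PySem.List.pyRange_one_succ_right (by omega), List.foldl_append]
    simp only [List.foldl_cons, List.foldl_nil]
    rw [bump_len, ih]

lemma loopB_point (n : Nat) (hn : 0 < n) (idx : Int) (j : Nat) (hj : j < n) :
    ∀ (r : Nat) (bs : List Int), bs.length = n →
    PySem.List.pyGetD ((PySem.List.pyRange 1 ((r:Int)+1) 1).foldl
        (fun bs k => pyBumpAt bs (PySem.Int.mod (idx + k) (n:Int))) bs) ((j:Nat):Int) 0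
      = PySem.List.pyGetD bs ((j:Nat):Int) 0 + (hits (idx+1) (n:Int) (j:Int) r : Int) := by
  intro r
  induction r with
  | zero =>
    intro bs hlen
    rw [show (((0:Nat):Int) + 1) = 1 by norm_num, PySem.List.pyRange_one_eq_nil le_rfl]
    simp [hits_zero]
  | succ r ih =>
    intro bs hlen
    rw [show (((r+1:Nat):Int) + 1) = (((r:Int)+1) + 1) by push_cast; ring,
      PySem.List.pyRange_one_succ_right (by omega), List.foldl_append]
    simp only [List.foldl_cons, List.foldl_nil]
    have hbody : idx + ((r:Int)+1) = (idx + 1) + (r:Int) := by ring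
    rw [hbody, bump_point _ n hn (by rw [loopB_len, hlen]) ((idx+1) + (r:Int)) j hj,
      ih bs hlen, hits_back]
    push_cast
    ring

lemma idxOf?_of_mem (l : List Int) (a : Int) (h : a ∈ l) :
    List.idxOf? a l = some (List.idxOf a l) := by
  induction l with
  | nil => simp at h
  | cons x t ih =>
    by_cases hx : x = a
    · subst hx
      rw [List.idxOf?_cons, List.idxOf_cons_self]
      simp
    · have hat : a ∈ t := by
        rcases List.mem_cons.mp h with h' | h'
        · exact absurd h'.symm hx
        · exact h'
      simp [List.idxOf?_cons, List.idxOf_cons_ne t hx, hx, ih hat]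

-- ===== VERDICT (by name: the statement is the Claim_ definition above) =====
theorem redist_in_banks_spec : Claim_equal_redist_in_banks := by
  intro banks _ hpre
  unfold Spec_redist_in_banks
  cases banks with
  | nil => exact absurd rfl hpre
  | cons b rest =>
    set n := rest.length + 1 with hn
    have hn0 : 0 < n := Nat.succ_pos _
    have hlen : (b :: rest).length = n := by simp [hn]
    set m := List.foldl max b rest with hm
    have hmax : PySem.List.max? (b :: rest) (fun y => y) = some m := PySem.List.max?_id_cons b rest
    have hmem : m ∈ b :: rest := PySem.List.max?_mem hmax
    set K := List.idxOf m (b :: rest) with hK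
    have hKlt : K < n := by rw [← hlen]; exact List.idxOf_lt_length_iff.mpr hmem
    have hKlt' : K < (b :: rest).length := by rw [hlen]; exact hKlt
    have hgetK : (b :: rest)[K] = m := List.getElem_idxOf hKlt'
    have hget? : (b :: rest)[K]? = some m := by rw [List.getElem?_eq_getElem hKlt', hgetK]
    -- A's head: the chosen index and value
    have hA : redist_in_banks (b :: rest)
        = redistLoopAGo m.toNat ((b :: rest).set K 0) (K:Int) (n:Int) := by
      simp only [redist_in_banks, flb_eq_idxOf, ← hm, ← hK, PySem.List.pyGet?_natCast, hget?,
        PySem.List.pySetD_natCast, redistLoopA, hlen]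
    -- B's head: same index and value
    have hidx : PySem.List.index? (b :: rest) m = some K :=
      (PySem.List.index?_eq_idxOf? _ _).trans (idxOf?_of_mem _ _ hmem)
    rw [hA]
    by_cases hpos : 0 < m
    · -- distribute: v = m tokens
      obtain ⟨v, hv⟩ : ∃ v : Nat, m = (v:Nat) := ⟨m.toNat, (Int.toNat_of_nonneg hpos.le).symm⟩
      have hq : PySem.Int.floordiv m ((n:Nat):Int) = ((v / n : Nat):Int) := by
        rw [hv]; exact PySem.Int.floordiv_natCast v n
      have hr : PySem.Int.mod m ((n:Nat):Int) = ((v % n : Nat):Int) := by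
        rw [hv]; exact PySem.Int.mod_natCast v n
      simp only [redist_in_banks_alt, hmax, hidx, if_pos hpos, hlen, hq, hr]
      set banks1 := (b :: rest).set K 0 with hb1
      have hlen1 : banks1.length = n := by rw [hb1, List.length_set, hlen]
      set banks2 := banks1.map (fun x => x + ((v / n : Nat):Int)) with hb2
      have hlen2 : banks2.length = n := by rw [hb2, List.length_map, hlen1]
      have hrn : v % n < n := Nat.mod_lt _ hn0
      apply List.ext_getElem
      · rw [loopA_len, loopB_len, hlen1, hlen2]
      · intro j hj1 hj2
        have hjn : j < n := by rw [loopA_len, hlen1] at hj1; exact hj1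
        have hj0 : (0:Int) ≤ (j:Int) := by positivity
        have hjn' : ((j:Nat):Int) < ((n:Nat):Int) := by exact_mod_cast hjn
        rw [← PySem.List.pyGetD_ofNat _ j 0 hj1, ← PySem.List.pyGetD_ofNat _ j 0 hj2]
        rw [show m = ((v:Nat):Int) from hv] -- not needed for toNat arg?
        rw [show ((v:Nat):Int).toNat = v from Int.toNat_natCast v]
        rw [loopA_point n hn0 j hjn v banks1 (K:Int) hlen1,
          hits_closed n hn0 ((K:Int)+1) (j:Int) hj0 hjn' v,
          loopB_point n hn0 (K:Int) j hjn (v % n) banks2 hlen2,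
          hits_small n hn0 ((K:Int)+1) (j:Int) hj0 hjn' (v % n) hrn.le]
        have hmap : PySem.List.pyGetD banks2 ((j:Nat):Int) 0
            = PySem.List.pyGetD banks1 ((j:Nat):Int) 0 + ((v / n : Nat):Int) := by
          rw [PySem.List.pyGetD_ofNat banks2 j 0 (by rw [hlen2]; exact hjn),
            PySem.List.pyGetD_ofNat banks1 j 0 (by rw [hlen1]; exact hjn)]
          simp only [hb2, List.getElem_map]
        rw [hmap]
        push_cast
        ring
    · -- m ≤ 0: no tokens move; both sides return banks with bank K zeroed
      have hv0 : m.toNat = 0 := Int.toNat_of_nonpos (not_lt.mp hpos)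
      rw [hv0]
      simp only [redist_in_banks_alt, hmax, hidx, if_neg hpos]
      rfl
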